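-- pv_equiv track=rewrite | github.com/mathewhuen/fast-jsonl | src/fast_jsonl/cache.py | base10_to_base62
-- ===== SOURCE A (Python) =====
-- import string
--
-- def base10_to_base62(value):
--     base = 62
--     BASE62 = string.digits + string.ascii_letters
--     MAP62 = {i: char for i, char in enumerate(BASE62)}
--     output = list()
--     while value >= base:
--         output.append(value % base)
--         value = value // base
--     output.append(value)
--     output = output[::-1]
--     return "".join([MAP62[x] for x in output])
-- ===== SOURCE B (Python) =====
-- import string
--
-- DIGITS62 = string.digits + string.ascii_letters
--
-- def base10_to_base62(value):
--     if value < 62: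
--         return DIGITS62[value]
--     return base10_to_base62(value // 62) + DIGITS62[value % 62]
-- ===== Notes on version B (the rewrite author's own statement) =====
-- stated objective: simpler
-- what changed: Replaces the remainder-accumulating while loop with per-call dict construction and final list reversal by a direct recursion that emits digits most-significant-first via a single digit-string lookup.
import Mathlib
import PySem

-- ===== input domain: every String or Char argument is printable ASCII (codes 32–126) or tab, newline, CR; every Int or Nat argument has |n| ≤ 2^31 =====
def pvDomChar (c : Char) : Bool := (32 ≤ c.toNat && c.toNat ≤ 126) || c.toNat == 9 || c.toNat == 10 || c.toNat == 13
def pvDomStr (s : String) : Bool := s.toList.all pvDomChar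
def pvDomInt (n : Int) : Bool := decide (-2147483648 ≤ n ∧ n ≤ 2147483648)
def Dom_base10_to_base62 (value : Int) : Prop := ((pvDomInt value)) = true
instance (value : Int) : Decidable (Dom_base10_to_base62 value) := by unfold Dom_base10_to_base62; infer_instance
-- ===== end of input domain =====

-- B replaces A's remainder-accumulating loop + dict map + reversal by a direct
-- most-significant-first recursion over a digit-string lookup (objective: simpler).


-- ===== PORT A =====
-- BASE62 = string.digits + string.ascii_letters
def pvBASE62 : List Char := "0123456789abcdefghijklmnopqrstuvwxyzABCDEFGHIJKLMNOPQRSTUVWXYZ".toList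

-- MAP62 = {i: char for i, char in enumerate(BASE62)}
def pvMAP62 : PySem.Dict Int Char := PySem.Dict.ofList (PySem.List.enumerate pvBASE62)

-- the while loop: while value >= base: output.append(value % base); value //= base; then output.append(value)
def pvLoopA (value : Int) (output : List Int) : List Int :=
  if h : 62 ≤ value then
    pvLoopA (PySem.Int.floordiv value 62) (output ++ [PySem.Int.mod value 62])
  else output ++ [value]
termination_by value.toNat
decreasing_by
  have h3 : PySem.Int.floordiv value 62 < value :=
    (PySem.Int.floordiv_lt_iff_lt_mul (by omega)).mpr (by nlinarith)
  omega

-- MAP62[x] raises KeyError for x < 0 (outside Pre_); here the missing case yields '?'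
def pvLookA (x : Int) : Char := (pvMAP62.get? x).getD '?'

-- output = output[::-1]; return "".join([MAP62[x] for x in output])  (join of 1-char strings = ofList of the chars)
def base10_to_base62 (value : Int) : String :=
  let output := pvLoopA value []
  let output := (PySem.List.slice? output none none (-1)).getD []
  String.ofList (output.map pvLookA)

-- ===== PORT B =====
-- DIGITS62[i] raises IndexError for i < -62 (outside Pre_); here the missing case yields '?'
def pvDig (i : Int) : Char := (PySem.List.pyGet? pvBASE62 i).getD '?'

-- the recursion of Source B, on the char-list side of strings ('+' = list append)
def pvAltChars (value : Int) : List Char :=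
  if h : value < 62 then [pvDig value]
  else pvAltChars (PySem.Int.floordiv value 62) ++ [pvDig (PySem.Int.mod value 62)]
termination_by value.toNat
decreasing_by
  have h3 : PySem.Int.floordiv value 62 < value :=
    (PySem.Int.floordiv_lt_iff_lt_mul (by omega)).mpr (by nlinarith)
  omega

def base10_to_base62_alt (value : Int) : String := String.ofList (pvAltChars value)

-- ===== PRECONDITION & SPEC =====
-- A raises KeyError on every negative value (MAP62 has no negative keys); Pre_ excludes exactly those.
def Pre_base10_to_base62 (value : Int) : Prop := 0 ≤ value
instance (value : Int) : Decidable (Pre_base10_to_base62 value) := by unfold Pre_base10_to_base62; infer_instance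
def pvWitness_base10_to_base62 : Int := (137)

def Spec_base10_to_base62 (value : Int) (out : String) : Prop := out = base10_to_base62_alt value
instance (value : Int) (out : String) : Decidable (Spec_base10_to_base62 value out) := by unfold Spec_base10_to_base62; infer_instance

-- ===== CLAIM (what is proved, stated in full; the proofs are below) =====
def Claim_equal_base10_to_base62 : Prop := ∀ (value : Int), Dom_base10_to_base62 value → Pre_base10_to_base62 value → Spec_base10_to_base62 value (base10_to_base62 value)

-- ===== LEMMAS AND PROOFS =====

-- the digit list A's loop builds, least-significant first
def pvDigits (value : Int) : List Int :=
  if h : 62 ≤ value then PySem.Int.mod value 62 :: pvDigits (PySem.Int.floordiv value 62)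
  else [value]
termination_by value.toNat
decreasing_by
  have h3 : PySem.Int.floordiv value 62 < value :=
    (PySem.Int.floordiv_lt_iff_lt_mul (by omega)).mpr (by nlinarith)
  omega

lemma pvLoopA_eq (value : Int) : ∀ output : List Int, pvLoopA value output = output ++ pvDigits value := by
  fun_induction pvDigits value with
  | case1 v h ih =>
    intro o
    rw [pvLoopA, dif_pos h, ih]
    simp
  | case2 v h =>
    intro o
    rw [pvLoopA, dif_neg h]

set_option maxRecDepth 40000 in
lemma pvLookA_eq_pvDig (x : Int) (h0 : 0 ≤ x) (h1 : x < 62) : pvLookA x = pvDig x := by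
  have key : ∀ n : Nat, n < 62 → pvLookA (n : Int) = pvDig (n : Int) := by decide
  have hx : x = ((x.toNat : Nat) : Int) := by omega
  rw [hx]
  exact key x.toNat (by omega)

lemma pvDigits_reverse_map (value : Int) (h0 : 0 ≤ value) :
    (pvDigits value).reverse.map pvLookA = pvAltChars value := by
  fun_induction pvDigits value with
  | case1 v h ih =>
    have hm0 : 0 ≤ PySem.Int.mod v 62 := PySem.Int.mod_nonneg v (by omega)
    have hm1 : PySem.Int.mod v 62 < 62 := PySem.Int.mod_lt v (by omega)
    have hd : PySem.Int.floordiv v 62 = v / 62 := PySem.Int.floordiv_eq_ediv_of_pos (by omega)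
    have hd0 : (0:Int) ≤ v / 62 := Int.ediv_nonneg (by omega) (by omega)
    rw [pvAltChars, dif_neg (by omega)]
    simp only [List.reverse_cons, List.map_append, List.map_cons, List.map_nil]
    rw [ih (by omega), pvLookA_eq_pvDig _ hm0 hm1]
  | case2 v h =>
    rw [pvAltChars, dif_pos (by omega)]
    simp [pvLookA_eq_pvDig v h0 (by omega)]

-- ===== VERDICT (by name: the statement is the Claim_ definition above) =====
theorem base10_to_base62_spec : Claim_equal_base10_to_base62 := by
  intro value _ hpre
  show String.ofList ((((PySem.List.slice? (pvLoopA value []) none none (-1))).getD []).map pvLookA)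
    = String.ofList (pvAltChars value)
  rw [pvLoopA_eq value [], List.nil_append, PySem.List.slice?_none_none_neg_one,
    Option.getD_some, pvDigits_reverse_map value hpre]
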